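-- pv_equiv track=rewrite | github.com/Junaid-Altaf/Ai-object-narrator | app.py | build_announcement
-- ===== SOURCE A (Python) =====
-- def build_announcement(labels: list[str]) -> str:
--     """Pick the most 'important' label and form a natural phrase."""
--     priority = ["person", "car", "dog", "cat", "bicycle", "motorcycle"]
--     for p in priority:
--         if p in labels:
--             return f"{p.capitalize()} detected"
--     if labels:
--         return f"{labels[0].capitalize()} in front"
--     return ""
-- ===== SOURCE B (Python) =====
-- def build_announcement(labels: list[str]) -> str:
--     """Pick the most 'important' label and form a natural phrase."""
--     priority = ["person", "car", "dog", "cat", "bicycle", "motorcycle"]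
--     ranks = {label: i for i, label in enumerate(priority)}
--     best = None  # (rank, label) with the smallest rank seen so far
--     for l in labels:
--         r = ranks.get(l)
--         if r is not None and (best is None or r < best[0]):
--             best = (r, l)
--     if best is not None:
--         return f"{best[1].capitalize()} detected"
--     if labels:
--         return f"{labels[0].capitalize()} in front"
--     return ""
-- ===== Notes on version B (the rewrite author's own statement) =====
-- stated objective: alternative
-- what changed: Instead of scanning labels once per priority word (first hit wins), B builds a label->rank dict once and makes a single pass over labels keeping the (rank, label) pair with the smallest rank.
import Mathlib
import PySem

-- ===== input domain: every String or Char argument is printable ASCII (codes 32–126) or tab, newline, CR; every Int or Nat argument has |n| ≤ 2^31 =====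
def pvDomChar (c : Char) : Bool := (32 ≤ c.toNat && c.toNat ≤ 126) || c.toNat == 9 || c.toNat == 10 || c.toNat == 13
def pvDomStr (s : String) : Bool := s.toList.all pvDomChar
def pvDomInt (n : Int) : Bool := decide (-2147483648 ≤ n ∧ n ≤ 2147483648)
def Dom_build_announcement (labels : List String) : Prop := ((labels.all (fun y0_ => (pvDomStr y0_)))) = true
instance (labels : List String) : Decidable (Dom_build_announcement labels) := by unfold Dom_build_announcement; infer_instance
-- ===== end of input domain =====

-- B replaces A's per-priority scans of `labels` with one dict-indexed pass keeping the minimal-rank label (objective: alternative).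

-- shared helper: Python str.capitalize() (first char upper, rest lower); exact on ASCII
def pyCapitalize (s : String) : String :=
  match s.toList with
  | [] => ""
  | c :: cs => String.ofList (PySem.Chars.upperChar c :: PySem.Chars.lower cs)

-- ===== PORT A =====
-- the 'for p in priority' loop with early return
def pvScanA (labels : List String) : List String → String
  | [] =>
    match labels with
    | [] => ""
    | h :: _ => pyCapitalize h ++ " in front"
  | p :: ps =>
    if labels.contains p then pyCapitalize p ++ " detected" else pvScanA labels ps

def build_announcement (labels : List String) : String :=
  pvScanA labels ["person", "car", "dog", "cat", "bicycle", "motorcycle"]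

-- ===== PORT B =====
def pvRanks : PySem.Dict String Int :=
  (PySem.List.enumerate ["person", "car", "dog", "cat", "bicycle", "motorcycle"]).foldl
    (fun d iv => d.insert iv.2 iv.1) PySem.Dict.empty

def pvStep (best : Option (Int × String)) (l : String) : Option (Int × String) :=
  match pvRanks.get? l with
  | none => best
  | some r =>
    match best with
    | none => some (r, l)
    | some b => if r < b.1 then some (r, l) else some b

def build_announcement_alt (labels : List String) : String :=
  match labels.foldl pvStep none with
  | some b => pyCapitalize b.2 ++ " detected"
  | none =>
    match labels with
    | [] => ""
    | h :: _ => pyCapitalize h ++ " in front"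

-- ===== PRECONDITION & SPEC =====
def Spec_build_announcement (labels : List String) (out : String) : Prop := out = build_announcement_alt labels
instance (labels : List String) (out : String) : Decidable (Spec_build_announcement labels out) := by unfold Spec_build_announcement; infer_instance

-- ===== CLAIM (what is proved, stated in full; the proofs are below) =====
def Claim_equal_build_announcement : Prop := ∀ (labels : List String), Dom_build_announcement labels → Spec_build_announcement labels (build_announcement labels)

-- ===== LEMMAS AND PROOFS =====

-- the minimal (rank, label) pair among labels, by priority order
def pvCand (ls : List String) : Option (Int × String) :=
  if ls.contains "person" then some (0, "person")
  else if ls.contains "car" then some (1, "car")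
  else if ls.contains "dog" then some (2, "dog")
  else if ls.contains "cat" then some (3, "cat")
  else if ls.contains "bicycle" then some (4, "bicycle")
  else if ls.contains "motorcycle" then some (5, "motorcycle")
  else none

def pvMin (a b : Option (Int × String)) : Option (Int × String) :=
  match a, b with
  | none, b => b
  | a, none => a
  | some x, some y => if y.1 < x.1 then some y else some x

theorem pvRanks_get (l : String) :
    pvRanks.get? l =
      if "person" == l then some 0
      else if "car" == l then some 1
      else if "dog" == l then some 2
      else if "cat" == l then some 3
      else if "bicycle" == l then some 4
      else if "motorcycle" == l then some 5
      else none := by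
  have h : pvRanks = PySem.Dict.mk [("person", 0), ("car", 1), ("dog", 2), ("cat", 3),
      ("bicycle", 4), ("motorcycle", 5)] := by decide
  rw [h]
  simp only [PySem.Dict.get?, List.find?]
  by_cases h1 : "person" = l
  · subst h1; simp
  by_cases h2 : "car" = l
  · subst h2; simp
  by_cases h3 : "dog" = l
  · subst h3; simp
  by_cases h4 : "cat" = l
  · subst h4; simp
  by_cases h5 : "bicycle" = l
  · subst h5; simp
  by_cases h6 : "motorcycle" = l
  · subst h6; simp
  have n1 : ("person" == l) = false := beq_eq_false_iff_ne.mpr h1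
  have n2 : ("car" == l) = false := beq_eq_false_iff_ne.mpr h2
  have n3 : ("dog" == l) = false := beq_eq_false_iff_ne.mpr h3
  have n4 : ("cat" == l) = false := beq_eq_false_iff_ne.mpr h4
  have n5 : ("bicycle" == l) = false := beq_eq_false_iff_ne.mpr h5
  have n6 : ("motorcycle" == l) = false := beq_eq_false_iff_ne.mpr h6
  simp [n1, n2, n3, n4, n5, n6]

def pvCand1 (l : String) : Option (Int × String) :=
  (pvRanks.get? l).map (fun r => (r, l))

theorem pvStep_eq (acc : Option (Int × String)) (l : String) :
    pvStep acc l = pvMin acc (pvCand1 l) := by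
  unfold pvStep pvCand1
  cases pvRanks.get? l <;> cases acc <;> rfl

theorem pvMin_assoc (a b c : Option (Int × String)) :
    pvMin (pvMin a b) c = pvMin a (pvMin b c) := by
  rcases a with _ | x
  · rfl
  rcases b with _ | y
  · rcases c with _ | z <;> rfl
  rcases c with _ | z
  · show (match (if y.1 < x.1 then some y else some x : Option (Int × String)), (none : Option (Int × String)) with
      | none, b => b | a, none => a
      | some x, some y => if y.1 < x.1 then some y else some x) = _
    split_ifs with hcond <;> simp [pvMin, hcond]
  by_cases h1 : y.1 < x.1 <;> by_cases h2 : z.1 < y.1 <;> by_cases h3 : z.1 < x.1 <;>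
    simp [pvMin, h1, h2, h3] <;> (exfalso; omega)

theorem pvCand_cons (l : String) (ls : List String) :
    pvCand (l :: ls) = pvMin (pvCand1 l) (pvCand ls) := by
  by_cases h1 : l = "person"
  · subst h1
    rcases hpc : pvCand ls with _ | p <;> simp only [pvCand] at hpc <;> split_ifs at hpc <;>
      simp_all [pvCand, pvCand1, pvRanks_get, pvMin] <;>
      (subst hpc; simp)
  by_cases h2 : l = "car"
  · subst h2
    rcases hpc : pvCand ls with _ | p <;> simp only [pvCand] at hpc <;> split_ifs at hpc <;>
      simp_all [pvCand, pvCand1, pvRanks_get, pvMin] <;>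
      (subst hpc; simp)
  by_cases h3 : l = "dog"
  · subst h3
    rcases hpc : pvCand ls with _ | p <;> simp only [pvCand] at hpc <;> split_ifs at hpc <;>
      simp_all [pvCand, pvCand1, pvRanks_get, pvMin] <;>
      (subst hpc; simp)
  by_cases h4 : l = "cat"
  · subst h4
    rcases hpc : pvCand ls with _ | p <;> simp only [pvCand] at hpc <;> split_ifs at hpc <;>
      simp_all [pvCand, pvCand1, pvRanks_get, pvMin] <;>
      (subst hpc; simp)
  by_cases h5 : l = "bicycle"
  · subst h5
    rcases hpc : pvCand ls with _ | p <;> simp only [pvCand] at hpc <;> split_ifs at hpc <;>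
      simp_all [pvCand, pvCand1, pvRanks_get, pvMin] <;>
      (subst hpc; simp)
  by_cases h6 : l = "motorcycle"
  · subst h6
    rcases hpc : pvCand ls with _ | p <;> simp only [pvCand] at hpc <;> split_ifs at hpc <;>
      simp_all [pvCand, pvCand1, pvRanks_get, pvMin] <;>
      (subst hpc; simp)
  have n1 : ("person" == l) = false := by simp [Ne.symm h1]
  have n2 : ("car" == l) = false := by simp [Ne.symm h2]
  have n3 : ("dog" == l) = false := by simp [Ne.symm h3]
  have n4 : ("cat" == l) = false := by simp [Ne.symm h4]
  have n5 : ("bicycle" == l) = false := by simp [Ne.symm h5]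
  have n6 : ("motorcycle" == l) = false := by simp [Ne.symm h6]
  simp [pvCand, pvCand1, pvRanks_get, pvMin, n1, n2, n3, n4, n5, n6,
    Ne.symm h1, Ne.symm h2, Ne.symm h3, Ne.symm h4, Ne.symm h5, Ne.symm h6]

theorem pvFoldl_inv (ls : List String) (acc : Option (Int × String)) :
    ls.foldl pvStep acc = pvMin acc (pvCand ls) := by
  induction ls generalizing acc with
  | nil => cases acc <;> rfl
  | cons l ls ih =>
    rw [List.foldl_cons, ih, pvStep_eq, pvMin_assoc, ← pvCand_cons]

theorem pvA_cand (labels : List String) :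
    build_announcement labels =
      match pvCand labels with
      | some b => pyCapitalize b.2 ++ " detected"
      | none =>
        match labels with
        | [] => ""
        | h :: _ => pyCapitalize h ++ " in front" := by
  simp only [build_announcement, pvScanA, pvCand]
  split_ifs <;> rfl

-- ===== VERDICT (by name: the statement is the Claim_ definition above) =====
theorem build_announcement_spec : Claim_equal_build_announcement := by
  intro labels _
  unfold Spec_build_announcement build_announcement_alt
  rw [pvFoldl_inv, pvA_cand]
  rfl
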